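-- pv_equiv track=rewrite | github.com/HaraHeique/TCC-rede-neural-siamesa | src/core/data_structuring.py | __get_author_combinations
-- ===== SOURCE A (Python) =====
-- import itertools
--
-- def __get_author_combinations(authors):
--     combinations_object = itertools.combinations(authors, 2)
--     combinations = list(combinations_object)
--
--     # checking the number of times a token of a combination appears
--     n_combinations_per_token = 0
--
--     if len(combinations) > 0:
--         token_to_check = combinations[0][0]
--
--         for combination in combinations:
--             is_in_combination = combination[0] == token_to_check or combination[1] == token_to_check
--             n_combinations_per_token += 1 if is_in_combination else 0
--
--     return combinations, n_combinations_per_token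
-- ===== SOURCE B (Python) =====
-- import itertools
--
-- def __get_author_combinations(authors):
--     authors = list(authors)
--     combinations = list(itertools.combinations(authors, 2))
--     n = len(authors)
--     if n < 2:
--         return combinations, 0
--     token = authors[0]
--     c = sum(1 for a in authors if a == token)
--     return combinations, n * (n - 1) // 2 - (n - c) * (n - c - 1) // 2
-- ===== Notes on version B (the rewrite author's own statement) =====
-- stated objective: simpler
-- what changed: The per-pair counting loop over all combinations is replaced by a closed-form count: with n authors and c value-equal copies of the first author, the number of pairs containing that value is n*(n-1)//2 - (n-c)*(n-c-1)//2.
import Mathlib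
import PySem

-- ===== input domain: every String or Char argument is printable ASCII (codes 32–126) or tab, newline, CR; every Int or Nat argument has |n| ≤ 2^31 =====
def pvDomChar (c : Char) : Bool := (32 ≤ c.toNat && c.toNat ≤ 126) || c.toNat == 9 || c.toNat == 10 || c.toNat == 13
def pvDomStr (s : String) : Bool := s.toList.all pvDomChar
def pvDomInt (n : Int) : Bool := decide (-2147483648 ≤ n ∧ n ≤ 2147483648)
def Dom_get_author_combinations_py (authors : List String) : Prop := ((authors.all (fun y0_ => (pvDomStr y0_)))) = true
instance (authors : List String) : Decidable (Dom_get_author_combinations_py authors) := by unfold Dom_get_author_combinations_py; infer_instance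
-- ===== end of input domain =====

-- B replaces A's per-pair counting loop by the closed-form count
-- n*(n-1)//2 - (n-c)*(n-c-1)//2 (c = copies of the first author); objective: simpler.

-- ===== PORT A =====
-- itertools.combinations(authors, 2), in itertools' order (used by both Pythons)
def pyCombos2 : List String → List (String × String)
  | [] => []
  | x :: xs => xs.map (fun y => (x, y)) ++ pyCombos2 xs

def get_author_combinations_py (authors : List String) : (List (String × String)) × Int :=
  let combinations := pyCombos2 authors
  match combinations with
  | [] => (combinations, 0)
  | c0 :: _ =>
    let token := c0.1
    let n := combinations.foldl
      (fun acc comb => acc + (if comb.1 == token || comb.2 == token then (1 : Int) else 0)) 0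
    (combinations, n)

-- ===== PORT B =====
def get_author_combinations_py_alt (authors : List String) : (List (String × String)) × Int :=
  let combinations := pyCombos2 authors
  let n : Int := authors.length
  if n < 2 then (combinations, 0)
  else
    let token := authors.headD ""
    let c : Int := authors.countP (fun a => a == token)
    (combinations,
      PySem.Int.floordiv (n * (n - 1)) 2 - PySem.Int.floordiv ((n - c) * (n - c - 1)) 2)

-- ===== PRECONDITION & SPEC =====
def Spec_get_author_combinations_py (authors : List String) (out : (List (String × String)) × Int) : Prop := out = get_author_combinations_py_alt authors
instance (authors : List String) (out : (List (String × String)) × Int) : Decidable (Spec_get_author_combinations_py authors out) := by unfold Spec_get_author_combinations_py; infer_instance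

-- ===== CLAIM (what is proved, stated in full; the proofs are below) =====
def Claim_equal_get_author_combinations_py : Prop := ∀ (authors : List String), Dom_get_author_combinations_py authors → Spec_get_author_combinations_py authors (get_author_combinations_py authors)

-- ===== LEMMAS AND PROOFS =====

-- A's accumulator loop is countP
theorem foldl_count_eq (p : String × String → Bool) (l : List (String × String)) (acc : Int) :
    l.foldl (fun a x => a + (if p x then 1 else 0)) acc = acc + l.countP p := by
  induction l generalizing acc with
  | nil => simp
  | cons x xs ih =>
    simp only [List.foldl_cons, List.countP_cons, ih]
    split <;> push_cast <;> ring

-- closed-form identity for the number of pairs containing a copy of t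
theorem key (t : String) (l : List String) :
    2 * ((pyCombos2 l).countP (fun p => p.1 == t || p.2 == t) : Int)
      = (l.length : Int) * ((l.length : Int) - 1)
        - ((l.length : Int) - (l.countP (fun a => a == t) : Int))
          * ((l.length : Int) - (l.countP (fun a => a == t) : Int) - 1) := by
  induction l with
  | nil => simp
  | cons x xs ih =>
    simp only [pyCombos2, List.countP_append, List.countP_map, List.countP_cons,
      List.length_cons, Function.comp_def]
    by_cases hx : x = t
    · have h1 : (xs.countP (fun y => (x, y).1 == t || (x, y).2 == t)) = xs.length := by
        apply List.countP_eq_length.2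
        intro y _; simp [hx]
      rw [h1]
      simp only [hx, beq_self_eq_true, if_true]
      push_cast
      linear_combination ih
    · have h1 : (xs.countP (fun y => (x, y).1 == t || (x, y).2 == t))
          = xs.countP (fun a => a == t) := by
        apply List.countP_congr
        intro y _
        simp [hx]
      rw [h1]
      simp only [beq_iff_eq, hx, if_false]
      push_cast
      linear_combination ih

-- ===== VERDICT (by name: the statement is the Claim_ definition above) =====
theorem get_author_combinations_py_spec : Claim_equal_get_author_combinations_py := by
  intro authors _
  unfold Spec_get_author_combinations_py
  match authors with
  | [] => rfl
  | [x] => rfl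
  | x :: y :: ys =>
    show get_author_combinations_py (x :: y :: ys) = get_author_combinations_py_alt (x :: y :: ys)
    have hlen : ¬ ((((x :: y :: ys).length : Int)) < 2) := by
      simp only [List.length_cons]; push_cast; omega
    have hkey := key x (x :: y :: ys)
    have ha' : (((x :: y :: ys).length : Int)) * ((((x :: y :: ys).length : Int)) - 1)
        = 2 * ((((x :: y :: ys).length : Int)) * ((((x :: y :: ys).length : Int)) - 1) / 2) := by
      obtain ⟨a, ha⟩ := Int.even_mul_succ_self ((((x :: y :: ys).length : Int)) - 1)
      have h2 : (((x :: y :: ys).length : Int)) * ((((x :: y :: ys).length : Int)) - 1) = a + a := by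
        linear_combination ha
      omega
    have hb' : ((((x :: y :: ys).length : Int)) - ((x :: y :: ys).countP (fun a => a == x) : Int))
          * ((((x :: y :: ys).length : Int)) - ((x :: y :: ys).countP (fun a => a == x) : Int) - 1)
        = 2 * (((((x :: y :: ys).length : Int)) - ((x :: y :: ys).countP (fun a => a == x) : Int))
          * ((((x :: y :: ys).length : Int)) - ((x :: y :: ys).countP (fun a => a == x) : Int) - 1) / 2) := by
      obtain ⟨a, ha⟩ := Int.even_mul_succ_self
        (((((x :: y :: ys).length : Int)) - ((x :: y :: ys).countP (fun a => a == x) : Int)) - 1)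
      have h2 : ((((x :: y :: ys).length : Int)) - ((x :: y :: ys).countP (fun a => a == x) : Int))
          * ((((x :: y :: ys).length : Int)) - ((x :: y :: ys).countP (fun a => a == x) : Int) - 1) = a + a := by
        linear_combination ha
      omega
    have hC : pyCombos2 (x :: y :: ys) = (x, y) :: (ys.map (fun z => (x, z)) ++ pyCombos2 (y :: ys)) := by
      simp [pyCombos2]
    rw [hC] at hkey
    simp only [get_author_combinations_py, get_author_combinations_py_alt, hlen, if_false,
      List.headD, hC]
    refine Prod.ext rfl ?_
    rw [PySem.Int.floordiv_eq_ediv_of_pos (by norm_num), PySem.Int.floordiv_eq_ediv_of_pos (by norm_num)]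
    rw [foldl_count_eq]
    omega
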